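-- pv_equiv track=rewrite | github.com/ctc316/algorithm-python | Lintcode/Ladder_8_System Design/7_Location Based Service/530. Geohash II.py | index2bits
-- ===== SOURCE A (Python) =====
-- def index2bits(idx):
--     bits = ""
--     for i in range(5):
--         if idx % 2 == 0:
--             bits = '1' + bits
--         else:
--             bits = '0' + bits
--         idx //= 2
--
--     return bits
-- ===== SOURCE B (Python) =====
-- def index2bits(idx):
--     return format(31 - idx % 32, '05b')
-- ===== Notes on version B (the rewrite author's own statement) =====
-- stated objective: simpler
-- what changed: Replaces the 5-iteration prepend loop over idx%2 // idx//=2 with a closed-form expression: mask the five low bits, invert them as 31 - idx % 32, and render with format(..., '05b').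
import Mathlib
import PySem

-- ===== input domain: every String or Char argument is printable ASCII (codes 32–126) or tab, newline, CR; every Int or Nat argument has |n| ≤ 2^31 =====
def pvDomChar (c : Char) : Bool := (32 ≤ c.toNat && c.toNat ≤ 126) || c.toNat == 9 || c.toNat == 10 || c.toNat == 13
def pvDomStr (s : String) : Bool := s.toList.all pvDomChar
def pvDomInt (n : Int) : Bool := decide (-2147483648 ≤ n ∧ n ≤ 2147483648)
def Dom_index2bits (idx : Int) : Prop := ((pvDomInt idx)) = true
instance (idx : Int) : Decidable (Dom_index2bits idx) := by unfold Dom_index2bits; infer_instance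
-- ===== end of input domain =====

-- B replaces A's 5-iteration prepend loop with the closed form format(31 - idx % 32, '05b'); objective: simpler.


-- ===== PORT A =====
-- literal port of A: fold over range(5), prepending '1' on even, '0' on odd, halving idx
def index2bits (idx : Int) : String :=
  (((PySem.List.pyRange 0 5 1).foldl
      (fun (st : String × Int) _ =>
        ((if PySem.Int.mod st.2 2 == 0 then "1" ++ st.1 else "0" ++ st.1),
         PySem.Int.floordiv st.2 2))
      ("", idx))).1

-- ===== PORT B =====
-- port of format(m, '05b') for 0 ≤ m < 32: five binary digits, MSB first (exact on that range)
def bin5 (m : Int) : String :=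
  String.ofList ((List.range 5).map (fun i => if m.toNat.testBit (4 - i) then '1' else '0'))

def index2bits_alt (idx : Int) : String :=
  bin5 (31 - PySem.Int.mod idx 32)

-- ===== PRECONDITION & SPEC =====
def Spec_index2bits (idx : Int) (out : String) : Prop := out = index2bits_alt idx
instance (idx : Int) (out : String) : Decidable (Spec_index2bits idx out) := by unfold Spec_index2bits; infer_instance

-- ===== CLAIM (what is proved, stated in full; the proofs are below) =====
def Claim_equal_index2bits : Prop := ∀ (idx : Int), Dom_index2bits idx → Spec_index2bits idx (index2bits idx)

-- ===== LEMMAS AND PROOFS =====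
theorem pv_mod2 (a : Int) : PySem.Int.mod a 2 = a % 2 :=
  PySem.Int.mod_eq_emod_of_pos (by norm_num)

theorem pv_mod32 (a : Int) : PySem.Int.mod a 32 = a % 32 :=
  PySem.Int.mod_eq_emod_of_pos (by norm_num)

theorem pv_div2 (a : Int) : PySem.Int.floordiv a 2 = a / 2 :=
  PySem.Int.floordiv_eq_ediv_of_pos (by norm_num)

theorem indexA_mod (idx : Int) : index2bits idx = index2bits (idx % 32) := by
  have h1 : idx % 2 = (idx % 32) % 2 := by omega
  have h2 : idx / 2 % 2 = (idx % 32) / 2 % 2 := by omega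
  have h3 : idx / 2 / 2 % 2 = (idx % 32) / 2 / 2 % 2 := by omega
  have h4 : idx / 2 / 2 / 2 % 2 = (idx % 32) / 2 / 2 / 2 % 2 := by omega
  have h5 : idx / 2 / 2 / 2 / 2 % 2 = (idx % 32) / 2 / 2 / 2 / 2 % 2 := by omega
  simp only [index2bits, show PySem.List.pyRange 0 5 1 = [0, 1, 2, 3, 4] from by decide,
    List.foldl, pv_mod2, pv_div2, h1, h2, h3, h4, h5]

theorem indexB_mod (idx : Int) : index2bits_alt idx = index2bits_alt (idx % 32) := by
  simp only [index2bits_alt, pv_mod32, Int.emod_emod_of_dvd idx (by norm_num : (32 : Int) ∣ 32)]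

-- ===== VERDICT (by name: the statement is the Claim_ definition above) =====
theorem index2bits_spec : Claim_equal_index2bits := by
  intro idx _
  unfold Spec_index2bits
  rw [indexA_mod, indexB_mod]
  have h0 : 0 ≤ idx % 32 := by omega
  have h1 : idx % 32 < 32 := by omega
  set r := idx % 32 with hr
  clear_value r
  interval_cases r <;> decide
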